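-- pv_equiv track=rewrite | github.com/dominictarro/Solutions | solutions-py/taskOfPairing.py | taskOfPairing
-- ===== SOURCE A (Python) =====
-- def taskOfPairing(freq):
-- 	# Initialize the start of the continuous subarray
-- 	i_0 = 0
-- 	# Initialize the end of the continuous subarray
-- 	i_1 = 1
-- 	n = len(freq)
-- 	total = 0
--
-- 	while i_1 < n:
-- 		# While not at the end of the subarray, check if the next value is non-zero
-- 		if freq[i_1] == 0:
-- 			# If value is zero, take the sum of the continuous subarray and integer divide by 2. That's the
-- 			# number of pairs in this segment
-- 			total += sum(freq[i_0: i_1]) // 2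
-- 			# The new start of the continuous array is here
-- 			i_0 = i_1
-- 		i_1 += 1
-- 	# Upon reaching the end, find the number of pairs of the last subarray
-- 	total += sum(freq[i_0:i_1]) // 2
-- 	return total
-- ===== SOURCE B (Python) =====
-- def taskOfPairing(freq):
--     total = 0
--     cur = 0
--     for x in freq:
--         if x == 0:
--             total += cur // 2
--             cur = 0
--         else:
--             cur += x
--     return total + cur // 2
-- ===== Notes on version B (the rewrite author's own statement) =====
-- stated objective: simpler
-- what changed: B replaces the two-index while loop that re-sums each zero-delimited slice by a single for-each pass maintaining a running segment sum, adding cur//2 at each zero and once at the end.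
import Mathlib
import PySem

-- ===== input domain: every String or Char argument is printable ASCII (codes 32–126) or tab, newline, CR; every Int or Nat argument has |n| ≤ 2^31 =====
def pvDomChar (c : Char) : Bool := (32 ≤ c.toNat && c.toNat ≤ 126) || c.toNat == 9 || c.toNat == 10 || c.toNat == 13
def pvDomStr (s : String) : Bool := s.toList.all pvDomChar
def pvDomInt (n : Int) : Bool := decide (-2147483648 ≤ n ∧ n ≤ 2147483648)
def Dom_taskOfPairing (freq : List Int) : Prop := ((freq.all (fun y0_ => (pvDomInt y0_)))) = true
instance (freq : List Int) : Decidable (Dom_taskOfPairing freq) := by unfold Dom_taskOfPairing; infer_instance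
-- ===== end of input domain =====

-- B replaces A's two-index while loop with slice re-summing by one for-each pass with a running segment sum (objective: simpler).

-- ===== PORT A =====
-- the while loop: fuel = number of remaining iterations (n - i1); state (i0, i1, total).
-- freq[i1] is always in range here (1 ≤ i1 < n), so pyGetD's default 0 is never used.
def taskOfPairingLoop (freq : List Int) : Nat → Int → Int → Int → Int × Int × Int
  | 0, i0, i1, total => (i0, i1, total)
  | k + 1, i0, i1, total =>
    if PySem.List.pyGetD freq i1 0 = 0 then
      taskOfPairingLoop freq k i1 (i1 + 1)
        (total + PySem.Int.floordiv (PySem.List.slice freq (some i0) (some i1)).sum 2)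
    else
      taskOfPairingLoop freq k i0 (i1 + 1) total

def taskOfPairing (freq : List Int) : Int :=
  let n : Int := freq.length
  let r := taskOfPairingLoop freq (n - 1).toNat 0 1 0
  r.2.2 + PySem.Int.floordiv (PySem.List.slice freq (some r.1) (some r.2.1)).sum 2

-- ===== PORT B =====
def taskOfPairing_alt (freq : List Int) : Int :=
  let p := freq.foldl
    (fun (p : Int × Int) x =>
      if x = 0 then (p.1 + PySem.Int.floordiv p.2 2, 0) else (p.1, p.2 + x))
    (0, 0)
  p.1 + PySem.Int.floordiv p.2 2

-- ===== PRECONDITION & SPEC =====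
def Spec_taskOfPairing (freq : List Int) (out : Int) : Prop := out = taskOfPairing_alt freq
instance (freq : List Int) (out : Int) : Decidable (Spec_taskOfPairing freq out) := by unfold Spec_taskOfPairing; infer_instance

-- ===== CLAIM (what is proved, stated in full; the proofs are below) =====
def Claim_equal_taskOfPairing : Prop := ∀ (freq : List Int), Dom_taskOfPairing freq → Spec_taskOfPairing freq (taskOfPairing freq)

-- ===== LEMMAS AND PROOFS =====

-- B's loop step and the two "finish" readings of a final state, named for the proofs
def bStep (p : Int × Int) (x : Int) : Int × Int :=
  if x = 0 then (p.1 + PySem.Int.floordiv p.2 2, 0) else (p.1, p.2 + x)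

def finishA (freq : List Int) (r : Int × Int × Int) : Int :=
  r.2.2 + PySem.Int.floordiv (PySem.List.slice freq (some r.1) (some r.2.1)).sum 2

def finishB (p : Int × Int) : Int :=
  p.1 + PySem.Int.floordiv p.2 2

lemma slice_zero_zero (freq : List Int) :
    PySem.List.slice freq (some (0 : Int)) (some (0 : Int)) = [] := by
  have h := PySem.List.slice_natCast (xs := freq) (a := 0) (b := 0)
  simpa using h

-- Main invariant: finishing A's loop from fuel k, indices i0 ≤ i1 with i1 + k = length,
-- equals B's fold over the untraversed suffix started from (total, current-segment sum).
lemma loop_invariant (freq : List Int) (k : Nat) :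
    ∀ (i0 i1 : Nat) (total : Int), i0 ≤ i1 → i1 + k = freq.length →
    finishA freq (taskOfPairingLoop freq k (i0 : Int) (i1 : Int) total)
    = finishB ((freq.drop i1).foldl bStep
        (total, (PySem.List.slice freq (some (i0 : Int)) (some (i1 : Int))).sum)) := by
  induction k with
  | zero =>
    intro i0 i1 total h01 hk
    simp [taskOfPairingLoop, finishA, finishB,
      List.drop_of_length_le (by omega : freq.length ≤ i1)]
  | succ k ih =>
    intro i0 i1 total h01 hk
    have hi1 : i1 < freq.length := by omega
    have hdrop : freq.drop i1 = freq[i1] :: freq.drop (i1 + 1) :=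
      List.drop_eq_getElem_cons hi1
    have hget : PySem.List.pyGetD freq (i1 : Int) 0 = freq[i1] := by
      rw [PySem.List.pyGetD_natCast]
      exact List.getD_eq_getElem _ _ hi1
    have hsucc : ((i1 : Int) + 1) = ((i1 + 1 : Nat) : Int) := by push_cast; ring
    -- sum of the segment extended by one element
    have hext : ∀ j : Nat, j ≤ i1 →
        (PySem.List.slice freq (some (j : Int)) (some ((i1 + 1 : Nat) : Int))).sum
        = (PySem.List.slice freq (some (j : Int)) (some (i1 : Int))).sum + freq[i1] := by
      intro j hj
      rw [PySem.List.slice_natCast, PySem.List.slice_natCast]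
      have h1 : i1 + 1 - j = (i1 - j) + 1 := by omega
      have h2 : (freq.drop j)[i1 - j]? = some freq[i1] := by
        rw [List.getElem?_drop]
        have hji : j + (i1 - j) = i1 := by omega
        rw [hji]
        exact List.getElem?_eq_getElem hi1
      rw [h1, List.take_add_one, h2]
      simp
    rw [hdrop, List.foldl_cons]
    by_cases hx : freq[i1] = 0
    · -- zero: A resets the segment start; B adds cur // 2 and resets cur
      have hslice0 :
          (PySem.List.slice freq (some ((i1 : Nat) : Int)) (some ((i1 + 1 : Nat) : Int))).sum = 0 := by
        rw [hext i1 le_rfl, PySem.List.slice_natCast]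
        simp [hx]
      show finishA freq (taskOfPairingLoop freq (k + 1) (i0 : Int) (i1 : Int) total) = _
      rw [taskOfPairingLoop, if_pos (hget.trans hx), hsucc,
        ih i1 (i1 + 1) _ (by omega) (by omega), hslice0]
      simp [bStep, hx]
    · -- non-zero: A keeps scanning; B extends the running sum
      show finishA freq (taskOfPairingLoop freq (k + 1) (i0 : Int) (i1 : Int) total) = _
      rw [taskOfPairingLoop, if_neg (by rw [hget]; exact hx), hsucc,
        ih i0 (i1 + 1) total (by omega) (by omega), hext i0 h01]
      simp [bStep, hx]

-- A's first iteration never changes anything: from (0, 0) with full fuel it always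
-- lands on (0, 1, 0), since slice [0:0] sums to 0.
lemma loop_first_step (freq : List Int) (k : Nat) :
    taskOfPairingLoop freq (k + 1) 0 0 0 = taskOfPairingLoop freq k 0 1 0 := by
  rw [taskOfPairingLoop]
  split <;> simp [PySem.List.slice, PySem.Int.floordiv]

-- ===== VERDICT (by name: the statement is the Claim_ definition above) =====
theorem taskOfPairing_spec : Claim_equal_taskOfPairing := by
  intro freq _
  show taskOfPairing freq = taskOfPairing_alt freq
  cases freq with
  | nil => decide
  | cons x xs =>
    have hfuel : ((((x :: xs).length : Int)) - 1).toNat = (x :: xs).length - 1 := by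
      simp
    have h1 : (x :: xs).length - 1 + 1 = (x :: xs).length := by simp
    show finishA (x :: xs)
        (taskOfPairingLoop (x :: xs) ((((x :: xs).length : Int)) - 1).toNat 0 1 0)
      = finishB (List.foldl bStep (0, 0) (x :: xs))
    rw [hfuel]
    have key := loop_invariant (x :: xs) (x :: xs).length 0 0 0 le_rfl (by simp)
    simp only [Nat.cast_zero, List.drop_zero, slice_zero_zero, List.sum_nil] at key
    rw [← h1, loop_first_step] at key
    exact key
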